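-- pv_equiv track=rewrite | github.com/grammd/grammd.github.io | scripts/remove-footer-cta.py | remove_esl1yf_from_html
-- ===== SOURCE A (Python) =====
-- def extract_framer_1uotk10(html):
--     """Extract the framer-1uotk10 div with proper nesting."""
--     start = html.find('<div class="framer-1uotk10"')
--     if start < 0:
--         return None, None, None
--     depth = 0
--     i = start
--     while i < len(html):
--         if html[i : i + 4] == "<div" and (
--             i + 4 >= len(html) or html[i + 4] in " \t>"
--         ):
--             depth += 1
--         elif html[i : i + 6] == "</div>":
--             depth -= 1
--             if depth == 0:
--                 return start, i + 6, html[start : i + 6]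
--         i += 1
--     return None, None, None
--
-- def remove_esl1yf_from_html(html):
--     """Remove framer-esl1yf block but keep framer-1uotk10 in footer."""
--     footer_start = html.find("<footer")
--     if footer_start < 0:
--         return html, False
--
--     footer_end = html.find("</footer>", footer_start) + len("</footer>")
--     footer_section = html[footer_start:footer_end]
--
--     esl_start = footer_section.find('<div class="framer-esl1yf"')
--     if esl_start < 0:
--         return html, False
--
--     uotk_start, uotk_end, uotk_block = extract_framer_1uotk10(
--         footer_section[esl_start:]
--     )
--     if uotk_block is None:
--         return html, False
--
--     uotk_start_abs = esl_start + uotk_start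
--     before_esl = footer_section[:esl_start]
--     after_uotk = footer_section[uotk_start_abs + len(uotk_block) :]
--     for _ in range(4):
--         idx = after_uotk.find("</div>")
--         if idx >= 0:
--             after_uotk = after_uotk[idx + 6 :].lstrip()
--
--     new_footer = before_esl + uotk_block + after_uotk
--     new_html = html[:footer_start] + new_footer + html[footer_end:]
--     return new_html, True
-- ===== SOURCE B (Python) =====
-- def _balanced_uotk_span(s):
--     """Two-phase nesting match: index all tag events with find() jumps, then
--     balance-walk the two sorted position lists with a pointer merge."""
--     start = s.find('<div class="framer-1uotk10"')
--     if start < 0: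
--         return None
--     opens = []
--     j = s.find("<div", start)
--     while j >= 0:
--         if j + 4 >= len(s) or s[j + 4] in " \t>":
--             opens.append(j)
--         j = s.find("<div", j + 1)
--     closes = []
--     j = s.find("</div>", start)
--     while j >= 0:
--         closes.append(j)
--         j = s.find("</div>", j + 1)
--     depth = 0
--     oi = ci = 0
--     while ci < len(closes):
--         if oi < len(opens) and opens[oi] < closes[ci]:
--             depth += 1
--             oi += 1
--         else:
--             depth -= 1
--             ci += 1
--             if depth == 0:
--                 return start, closes[ci - 1] + 6
--     return None
--
--
-- def remove_esl1yf_from_html(html):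
--     """Remove framer-esl1yf block but keep framer-1uotk10 in footer."""
--     footer_start = html.find("<footer")
--     if footer_start < 0:
--         return html, False
--
--     footer_end = html.find("</footer>", footer_start) + len("</footer>")
--     footer = html[footer_start:footer_end]
--
--     esl_start = footer.find('<div class="framer-esl1yf"')
--     if esl_start < 0:
--         return html, False
--
--     span = _balanced_uotk_span(footer[esl_start:])
--     if span is None:
--         return html, False
--     u_start, u_end = span
--
--     tail = footer[esl_start + u_end:]
--     for _ in range(4):
--         idx = tail.find("</div>")
--         if idx < 0:
--             break
--         tail = tail[idx + 6:].lstrip()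
--
--     new_footer = footer[:esl_start] + footer[esl_start + u_start: esl_start + u_end] + tail
--     return html[:footer_start] + new_footer + html[footer_end:], True
-- ===== Notes on version B (the rewrite author's own statement) =====
-- stated objective: alternative
-- what changed: The nested-div match is rewritten from A's character-by-character depth scan into an index-then-balance two-phase pass: find()-jump loops first collect the ordered lists of open-tag and close-tag positions, then a two-pointer merge walks the events and returns at the balancing close; the surrounding footer glue is kept behaviourally identical.
import Mathlib
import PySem

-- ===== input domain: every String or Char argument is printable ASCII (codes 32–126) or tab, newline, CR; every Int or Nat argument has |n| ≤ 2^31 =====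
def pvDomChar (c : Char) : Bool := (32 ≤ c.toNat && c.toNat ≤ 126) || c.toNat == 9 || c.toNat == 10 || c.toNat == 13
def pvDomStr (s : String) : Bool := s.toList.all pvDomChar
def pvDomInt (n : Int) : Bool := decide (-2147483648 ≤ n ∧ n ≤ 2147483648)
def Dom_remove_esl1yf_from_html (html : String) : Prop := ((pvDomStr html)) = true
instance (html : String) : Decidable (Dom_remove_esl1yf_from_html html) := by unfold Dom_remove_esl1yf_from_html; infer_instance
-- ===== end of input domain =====

-- B replaces A's character-by-character depth scan with an index-then-balance pass: find()-jump
-- loops collect the sorted open/close tag positions, then a two-pointer merge walks them to the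
-- balancing close (objective: alternative decomposition; return values identical).

-- ===== PORT A =====
def pvA_scan (s : List Char) (start : Nat) : Nat → Nat → Int → Option (Nat × Nat × List Char)
  | 0, _, _ => none
  | fuel + 1, i, depth =>
    if i < s.length then
      if List.take 4 (List.drop i s) = "<div".toList ∧
          (s.length ≤ i + 4 ∨ List.getD s (i + 4) ' ' ∈ [' ', '\t', '>']) then
        pvA_scan s start fuel (i + 1) (depth + 1)
      else if List.take 6 (List.drop i s) = "</div>".toList then
        if depth - 1 = 0 then some (start, i + 6, List.take (i + 6 - start) (List.drop start s))
        else pvA_scan s start fuel (i + 1) (depth - 1)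
      else pvA_scan s start fuel (i + 1) depth
    else none

def pvA_extract (s : List Char) : Option (Nat × Nat × List Char) :=
  let start := PySem.Chars.find s "<div class=\"framer-1uotk10\"".toList
  if start < 0 then none
  else pvA_scan s start.toNat s.length start.toNat 0

def pvA_ctaTail (t : List Char) : List Char :=
  let idx := PySem.Chars.find t "</div>".toList
  if 0 ≤ idx then PySem.Chars.lstrip (List.drop (idx.toNat + 6) t) else t

def remove_esl1yf_from_html (html : String) : String × Bool :=
  let s := html.toList
  let footer_start := PySem.Chars.find s "<footer".toList
  if footer_start < 0 then (html, false)
  else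
    let fs := footer_start.toNat
    let fe := (PySem.Chars.findFrom s "</footer>".toList footer_start none + 9).toNat
    let footer := List.take (fe - fs) (List.drop fs s)
    let esl := PySem.Chars.find footer "<div class=\"framer-esl1yf\"".toList
    if esl < 0 then (html, false)
    else
      match pvA_extract (List.drop esl.toNat footer) with
      | none => (html, false)
      | some (us, _ue, ublock) =>
        let after := pvA_ctaTail (pvA_ctaTail (pvA_ctaTail (pvA_ctaTail
          (List.drop (esl.toNat + us + ublock.length) footer))))
        let new_footer := List.take esl.toNat footer ++ ublock ++ after
        (String.ofList (List.take fs s ++ new_footer ++ List.drop fe s), true)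

-- ===== PORT B =====
def pvB_openLoopF (s : List Char) : Nat → Int → List Nat → List Nat
  | 0, _, acc => acc
  | fuel + 1, j, acc =>
    if 0 ≤ j then
      let acc' := if s.length ≤ j.toNat + 4 ∨ List.getD s (j.toNat + 4) ' ' ∈ [' ', '\t', '>']
                  then acc ++ [j.toNat] else acc
      pvB_openLoopF s fuel (PySem.Chars.findFrom s "<div".toList (j + 1) none) acc'
    else acc

-- fuel s.length + 1 suffices: the cursor j strictly increases and stays below s.length
def pvB_openLoop (s : List Char) (j : Int) (acc : List Nat) : List Nat :=
  pvB_openLoopF s (s.length + 1) j acc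

def pvB_closeLoopF (s : List Char) : Nat → Int → List Nat → List Nat
  | 0, _, acc => acc
  | fuel + 1, j, acc =>
    if 0 ≤ j then
      pvB_closeLoopF s fuel (PySem.Chars.findFrom s "</div>".toList (j + 1) none)
        (acc ++ [j.toNat])
    else acc

def pvB_closeLoop (s : List Char) (j : Int) (acc : List Nat) : List Nat :=
  pvB_closeLoopF s (s.length + 1) j acc

def pvB_walkF : Nat → List Nat → List Nat → Int → Option Nat
  | 0, _, _, _ => none
  | fuel + 1, os, cs, d =>
    match os, cs with
    | _, [] => none
    | o :: os', c :: cs' =>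
      if o < c then pvB_walkF fuel os' (c :: cs') (d + 1)
      else if d - 1 = 0 then some (c + 6) else pvB_walkF fuel (o :: os') cs' (d - 1)
    | [], c :: cs' => if d - 1 = 0 then some (c + 6) else pvB_walkF fuel [] cs' (d - 1)

-- fuel = total number of events suffices: every step consumes one event
def pvB_walk (os cs : List Nat) (d : Int) : Option Nat :=
  pvB_walkF (os.length + cs.length) os cs d

def pvB_span (s : List Char) : Option (Nat × Nat) :=
  let start := PySem.Chars.find s "<div class=\"framer-1uotk10\"".toList
  if start < 0 then none
  else
    let opens := pvB_openLoop s (PySem.Chars.findFrom s "<div".toList start none) []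
    let closes := pvB_closeLoop s (PySem.Chars.findFrom s "</div>".toList start none) []
    match pvB_walk opens closes 0 with
    | some e => some (start.toNat, e)
    | none => none

def pvB_ctaTail : Nat → List Char → List Char
  | 0, t => t
  | n + 1, t =>
    let idx := PySem.Chars.find t "</div>".toList
    if idx < 0 then t
    else pvB_ctaTail n (PySem.Chars.lstrip (List.drop (idx.toNat + 6) t))

def remove_esl1yf_from_html_alt (html : String) : String × Bool :=
  let s := html.toList
  let footer_start := PySem.Chars.find s "<footer".toList
  if footer_start < 0 then (html, false)
  else
    let fs := footer_start.toNat
    let fe := (PySem.Chars.findFrom s "</footer>".toList footer_start none + 9).toNat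
    let footer := List.take (fe - fs) (List.drop fs s)
    let esl := PySem.Chars.find footer "<div class=\"framer-esl1yf\"".toList
    if esl < 0 then (html, false)
    else
      match pvB_span (List.drop esl.toNat footer) with
      | none => (html, false)
      | some (us, ue) =>
        let tail := pvB_ctaTail 4 (List.drop (esl.toNat + ue) footer)
        let new_footer := List.take esl.toNat footer ++
          List.take (ue - us) (List.drop (esl.toNat + us) footer) ++ tail
        (String.ofList (List.take fs s ++ new_footer ++ List.drop fe s), true)

-- ===== PRECONDITION & SPEC =====
def Spec_remove_esl1yf_from_html (html : String) (out : String × Bool) : Prop := out = remove_esl1yf_from_html_alt html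
instance (html : String) (out : String × Bool) : Decidable (Spec_remove_esl1yf_from_html html out) := by unfold Spec_remove_esl1yf_from_html; infer_instance

-- ===== CLAIM (what is proved, stated in full; the proofs are below) =====
def Claim_equal_remove_esl1yf_from_html : Prop := ∀ (html : String), Dom_remove_esl1yf_from_html html → Spec_remove_esl1yf_from_html html (remove_esl1yf_from_html html)

-- ===== LEMMAS AND PROOFS =====

-- tag-event predicates and the ordered list of event positions from index k (spec vocabulary)
def pvOpenAt (s : List Char) (j : Nat) : Bool :=
  decide ("<div".toList <+: List.drop j s) &&
    (decide (s.length ≤ j + 4) || decide (List.getD s (j + 4) ' ' ∈ [' ', '\t', '>']))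

def pvCloseAt (s : List Char) (j : Nat) : Bool :=
  decide ("</div>".toList <+: List.drop j s)

def pvOccs (s : List Char) (p : Nat → Bool) (k : Nat) : List Nat :=
  if _h : k < s.length then
    if p k then k :: pvOccs s p (k + 1) else pvOccs s p (k + 1)
  else []
termination_by s.length - k

theorem pvOccs_eq (s : List Char) (p : Nat → Bool) (k : Nat) :
    pvOccs s p k = if k < s.length then
      (if p k then k :: pvOccs s p (k + 1) else pvOccs s p (k + 1)) else [] := by
  by_cases h : k < s.length <;> rw [pvOccs] <;> simp [h]

theorem pvOccs_ge (s : List Char) (p : Nat → Bool) (k : Nat) :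
    ∀ x ∈ pvOccs s p k, k ≤ x := by
  have H : ∀ n k, s.length - k ≤ n → ∀ x ∈ pvOccs s p k, k ≤ x := by
    intro n
    induction n with
    | zero =>
      intro k hk x hx
      rw [pvOccs_eq, if_neg (by omega)] at hx
      simp at hx
    | succ n ih =>
      intro k hk x hx
      rw [pvOccs_eq] at hx
      by_cases hlt : k < s.length
      · rw [if_pos hlt] at hx
        by_cases hp : p k
        · rw [if_pos hp] at hx
          rcases List.mem_cons.mp hx with h | h
          · omega
          · have := ih (k + 1) (by omega) x h; omega
        · rw [if_neg hp] at hx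
          have := ih (k + 1) (by omega) x hx; omega
      · rw [if_neg hlt] at hx; simp at hx
  exact H (s.length - k) k (le_refl _)

theorem pvOccs_p (s : List Char) (p : Nat → Bool) (k : Nat) :
    ∀ x ∈ pvOccs s p k, p x = true := by
  have H : ∀ n k, s.length - k ≤ n → ∀ x ∈ pvOccs s p k, p x = true := by
    intro n
    induction n with
    | zero =>
      intro k hk x hx
      rw [pvOccs_eq, if_neg (by omega)] at hx
      simp at hx
    | succ n ih =>
      intro k hk x hx
      rw [pvOccs_eq] at hx
      by_cases hlt : k < s.length
      · rw [if_pos hlt] at hx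
        by_cases hp : p k
        · rw [if_pos hp] at hx
          rcases List.mem_cons.mp hx with h | h
          · rw [h]; exact hp
          · exact ih (k + 1) (by omega) x h
        · rw [if_neg hp] at hx
          exact ih (k + 1) (by omega) x hx
      · rw [if_neg hlt] at hx; simp at hx
  exact H (s.length - k) k (le_refl _)

theorem pvOccs_nil_of (s : List Char) (p : Nat → Bool) (k : Nat)
    (h : ∀ j, k ≤ j → j < s.length → p j = false) : pvOccs s p k = [] := by
  have H : ∀ n k, s.length - k ≤ n → (∀ j, k ≤ j → j < s.length → p j = false) →
      pvOccs s p k = [] := by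
    intro n
    induction n with
    | zero =>
      intro k hk _
      rw [pvOccs_eq, if_neg (by omega)]
    | succ n ih =>
      intro k hk hall
      rw [pvOccs_eq]
      by_cases hlt : k < s.length
      · rw [if_pos hlt, if_neg (by simp [hall k (le_refl _) hlt])]
        exact ih (k + 1) (by omega) (fun j h1 h2 => hall j (by omega) h2)
      · rw [if_neg hlt]
  exact H (s.length - k) k (le_refl _) h

theorem pvOccs_skip (s : List Char) (p : Nat → Bool) (k m : Nat) (hkm : k ≤ m)
    (h : ∀ j, k ≤ j → j < m → p j = false) : pvOccs s p k = pvOccs s p m := by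
  have H : ∀ n k, m - k ≤ n → k ≤ m → (∀ j, k ≤ j → j < m → p j = false) →
      pvOccs s p k = pvOccs s p m := by
    intro n
    induction n with
    | zero =>
      intro k hn hkm _
      have : k = m := by omega
      rw [this]
    | succ n ih =>
      intro k hn hkm hall
      by_cases hkm' : k = m
      · rw [hkm']
      · have hklt : k < m := by omega
        rw [pvOccs_eq]
        by_cases hlt : k < s.length
        · rw [if_pos hlt, if_neg (by simp [hall k (le_refl _) hklt])]
          exact ih (k + 1) (by omega) (by omega) (fun j h1 h2 => hall j (by omega) h2)
        · rw [if_neg hlt]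
          rw [pvOccs_nil_of s p m (fun j h1 h2 => absurd (by omega : j < s.length) (by omega))]
  exact H (m - k) k (le_refl _) hkm h

theorem pv_prefix_drop_infix {sub s : List Char} {k j : Nat} (hkj : k ≤ j)
    (h : sub <+: List.drop j s) : sub <:+: List.drop k s := by
  have hd : List.drop j s = List.drop (j - k) (List.drop k s) := by
    rw [List.drop_drop]; congr 1; omega
  rw [hd] at h
  exact h.isInfix.trans (List.drop_suffix (j - k) (List.drop k s)).isInfix

theorem pvB_openLoopF_spec (s : List Char) (fuel : Nat) :
    ∀ (k : Nat), k ≤ s.length → s.length + 1 - k ≤ fuel → ∀ (acc : List Nat),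
      pvB_openLoopF s fuel (PySem.Chars.findFrom s "<div".toList (k : Int) none) acc
        = acc ++ pvOccs s (pvOpenAt s) k := by
  induction fuel with
  | zero => intro k hk hn acc; omega
  | succ n ih =>
    intro k hk hn acc
    by_cases hneg : PySem.Chars.findFrom s "<div".toList (k : Int) none = -1
    · have hno := (PySem.Chars.findFrom_natCast_eq_neg_one_iff s "<div".toList k hk).mp hneg
      rw [hneg]
      simp only [pvB_openLoopF]
      rw [if_neg (by omega)]
      rw [pvOccs_nil_of s (pvOpenAt s) k
        (fun j h1 h2 => by
          simp only [pvOpenAt, Bool.and_eq_false_iff]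
          left
          simp only [decide_eq_false_iff_not]
          exact fun hp => hno (pv_prefix_drop_infix h1 hp))]
      simp
    · have hspec := PySem.Chars.findFrom_natCast_spec s "<div".toList k hk hneg
      set j := PySem.Chars.findFrom s "<div".toList (k : Int) none with hjdef
      have hj0 : 0 ≤ j := by omega
      have hpre := hspec.2.1
      have hjlen : j.toNat + 4 ≤ s.length := by
        have := List.IsPrefix.length_le hpre
        simp only [List.length_drop] at this
        have h4 : ("<div".toList).length = 4 := by decide
        omega
      simp only [pvB_openLoopF]
      rw [if_pos hj0]
      have hskip : pvOccs s (pvOpenAt s) k = pvOccs s (pvOpenAt s) j.toNat := by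
        apply pvOccs_skip s _ k j.toNat (by omega)
        intro i h1 h2
        simp only [pvOpenAt, Bool.and_eq_false_iff]
        left
        simp only [decide_eq_false_iff_not]
        exact hspec.2.2 i h1 h2
      have hocc : pvOccs s (pvOpenAt s) j.toNat
          = (if s.length ≤ j.toNat + 4 ∨ List.getD s (j.toNat + 4) ' ' ∈ [' ', '\t', '>']
             then [j.toNat] else []) ++ pvOccs s (pvOpenAt s) (j.toNat + 1) := by
        rw [pvOccs_eq, if_pos (by omega)]
        have hopen : pvOpenAt s j.toNat
            = decide (s.length ≤ j.toNat + 4 ∨ List.getD s (j.toNat + 4) ' ' ∈ [' ', '\t', '>']) := by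
          unfold pvOpenAt
          rw [decide_eq_true hpre, Bool.true_and, Bool.decide_or]
        rw [hopen]
        by_cases hcond : s.length ≤ j.toNat + 4 ∨ List.getD s (j.toNat + 4) ' ' ∈ [' ', '\t', '>']
        · rw [decide_eq_true hcond, if_pos rfl, if_pos hcond]; rfl
        · rw [decide_eq_false hcond, if_neg Bool.false_ne_true, if_neg hcond]; rfl
      have hnext : j + 1 = ((j.toNat + 1 : Nat) : Int) := by omega
      rw [hnext]
      rw [ih (j.toNat + 1) (by omega) (by omega)]
      rw [hskip, hocc]
      by_cases hcond : s.length ≤ j.toNat + 4 ∨ List.getD s (j.toNat + 4) ' ' ∈ [' ', '\t', '>']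
      · rw [if_pos hcond, if_pos hcond]; simp
      · rw [if_neg hcond, if_neg hcond]; simp

theorem pvB_openLoop_spec (s : List Char) (k : Nat) (hk : k ≤ s.length) (acc : List Nat) :
    pvB_openLoop s (PySem.Chars.findFrom s "<div".toList (k : Int) none) acc
      = acc ++ pvOccs s (pvOpenAt s) k :=
  pvB_openLoopF_spec s (s.length + 1) k hk (by omega) acc

theorem pvB_closeLoopF_spec (s : List Char) (fuel : Nat) :
    ∀ (k : Nat), k ≤ s.length → s.length + 1 - k ≤ fuel → ∀ (acc : List Nat),
      pvB_closeLoopF s fuel (PySem.Chars.findFrom s "</div>".toList (k : Int) none) acc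
        = acc ++ pvOccs s (pvCloseAt s) k := by
  induction fuel with
  | zero => intro k hk hn acc; omega
  | succ n ih =>
    intro k hk hn acc
    by_cases hneg : PySem.Chars.findFrom s "</div>".toList (k : Int) none = -1
    · have hno := (PySem.Chars.findFrom_natCast_eq_neg_one_iff s "</div>".toList k hk).mp hneg
      rw [hneg]
      simp only [pvB_closeLoopF]
      rw [if_neg (by omega)]
      rw [pvOccs_nil_of s (pvCloseAt s) k
        (fun j h1 h2 => by
          simp only [pvCloseAt, decide_eq_false_iff_not]
          exact fun hp => hno (pv_prefix_drop_infix h1 hp))]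
      simp
    · have hspec := PySem.Chars.findFrom_natCast_spec s "</div>".toList k hk hneg
      set j := PySem.Chars.findFrom s "</div>".toList (k : Int) none with hjdef
      have hj0 : 0 ≤ j := by omega
      have hpre := hspec.2.1
      have hjlen : j.toNat + 6 ≤ s.length := by
        have := List.IsPrefix.length_le hpre
        simp only [List.length_drop] at this
        have h6 : ("</div>".toList).length = 6 := by decide
        omega
      simp only [pvB_closeLoopF]
      rw [if_pos hj0]
      have hskip : pvOccs s (pvCloseAt s) k = pvOccs s (pvCloseAt s) j.toNat := by
        apply pvOccs_skip s _ k j.toNat (by omega)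
        intro i h1 h2
        simp only [pvCloseAt, decide_eq_false_iff_not]
        exact hspec.2.2 i h1 h2
      have hocc : pvOccs s (pvCloseAt s) j.toNat
          = j.toNat :: pvOccs s (pvCloseAt s) (j.toNat + 1) := by
        have hct : pvCloseAt s j.toNat = true := by
          unfold pvCloseAt; exact decide_eq_true hpre
        rw [pvOccs_eq, if_pos (by omega), hct, if_pos rfl]
      have hnext : j + 1 = ((j.toNat + 1 : Nat) : Int) := by omega
      rw [hnext]
      rw [ih (j.toNat + 1) (by omega) (by omega)]
      rw [hskip, hocc]
      simp

theorem pvB_closeLoop_spec (s : List Char) (k : Nat) (hk : k ≤ s.length) (acc : List Nat) :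
    pvB_closeLoop s (PySem.Chars.findFrom s "</div>".toList (k : Int) none) acc
      = acc ++ pvOccs s (pvCloseAt s) k :=
  pvB_closeLoopF_spec s (s.length + 1) k hk (by omega) acc

theorem pvB_walkF_nil (f : Nat) (os : List Nat) (d : Int) : pvB_walkF f os [] d = none := by
  cases f <;> cases os <;> rfl

theorem pvB_walk_nil (os : List Nat) (d : Int) : pvB_walk os [] d = none :=
  pvB_walkF_nil _ _ _

theorem pvB_walk_open (o : Nat) (os cs : List Nat) (d : Int) (h : ∀ c ∈ cs, o < c) :
    pvB_walk (o :: os) cs d = pvB_walk os cs (d + 1) := by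
  cases cs with
  | nil => rw [pvB_walk_nil, pvB_walk_nil]
  | cons c cs' =>
    have hoc : o < c := h c (by simp)
    show pvB_walkF ((o :: os).length + (c :: cs').length) (o :: os) (c :: cs') d = _
    rw [show (o :: os).length + (c :: cs').length = (os.length + (c :: cs').length) + 1 by
      simp [List.length_cons]; omega]
    simp only [pvB_walkF]
    rw [if_pos hoc]
    rfl

theorem pvB_walk_close (c : Nat) (os cs : List Nat) (d : Int) (h : ∀ o ∈ os, c < o) :
    pvB_walk os (c :: cs) d
      = if d - 1 = 0 then some (c + 6) else pvB_walk os cs (d - 1) := by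
  cases os with
  | nil =>
    show pvB_walkF ([].length + (c :: cs).length) [] (c :: cs) d = _
    rw [show ([] : List Nat).length + (c :: cs).length = (([] : List Nat).length + cs.length) + 1 by
      simp [List.length_cons]]
    simp only [pvB_walkF]
    rfl
  | cons o os' =>
    have hco : c < o := h o (by simp)
    show pvB_walkF ((o :: os').length + (c :: cs).length) (o :: os') (c :: cs) d = _
    rw [show (o :: os').length + (c :: cs).length = ((o :: os').length + cs.length) + 1 by
      simp [List.length_cons]; omega]
    simp only [pvB_walkF]
    rw [if_neg (by omega)]
    rfl

theorem pvB_walkF_mem (f : Nat) : ∀ (os cs : List Nat) (d : Int) (e : Nat),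
    pvB_walkF f os cs d = some e → ∃ c ∈ cs, e = c + 6 := by
  induction f with
  | zero => intro os cs d e h; cases h
  | succ n ih =>
    intro os cs d e h
    cases cs with
    | nil => rw [pvB_walkF_nil] at h; cases h
    | cons c cs' =>
      cases os with
      | nil =>
        simp only [pvB_walkF] at h
        by_cases hd : d - 1 = 0
        · rw [if_pos hd] at h
          exact ⟨c, by simp, by injection h with h'; omega⟩
        · rw [if_neg hd] at h
          obtain ⟨c', hc', he⟩ := ih [] cs' (d - 1) e h
          exact ⟨c', by simp [hc'], he⟩
      | cons o os' =>
        simp only [pvB_walkF] at h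
        by_cases hoc : o < c
        · rw [if_pos hoc] at h
          obtain ⟨c', hc', he⟩ := ih os' (c :: cs') (d + 1) e h
          exact ⟨c', hc', he⟩
        · rw [if_neg hoc] at h
          by_cases hd : d - 1 = 0
          · rw [if_pos hd] at h
            exact ⟨c, by simp, by injection h with h'; omega⟩
          · rw [if_neg hd] at h
            obtain ⟨c', hc', he⟩ := ih (o :: os') cs' (d - 1) e h
            exact ⟨c', by simp [hc'], he⟩

theorem pvB_walk_mem (os cs : List Nat) (d : Int) (e : Nat) (h : pvB_walk os cs d = some e) :
    ∃ c ∈ cs, e = c + 6 :=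
  pvB_walkF_mem _ os cs d e h

theorem pv_open_close_clash {s : List Char} {i : Nat}
    (h : "</div>".toList <+: List.drop i s) : ¬ "<div".toList <+: List.drop i s := by
  intro h2
  rcases h with ⟨t1, e1⟩
  rcases h2 with ⟨t2, e2⟩
  rw [← e1] at e2
  rw [show "</div>".toList = ['<', '/', 'd', 'i', 'v', '>'] from rfl] at e2
  rw [show "<div".toList = ['<', 'd', 'i', 'v'] from rfl] at e2
  simp at e2

theorem pv_open_take_iff (s : List Char) (i : Nat) :
    List.take 4 (List.drop i s) = "<div".toList ↔ "<div".toList <+: List.drop i s := by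
  constructor
  · intro h
    rw [List.prefix_iff_eq_take, show ("<div".toList).length = 4 from rfl]
    exact h.symm
  · intro h
    rw [List.prefix_iff_eq_take, show ("<div".toList).length = 4 from rfl] at h
    exact h.symm

theorem pv_close_take_iff (s : List Char) (i : Nat) :
    List.take 6 (List.drop i s) = "</div>".toList ↔ "</div>".toList <+: List.drop i s := by
  constructor
  · intro h
    rw [List.prefix_iff_eq_take, show ("</div>".toList).length = 6 from rfl]
    exact h.symm
  · intro h
    rw [List.prefix_iff_eq_take, show ("</div>".toList).length = 6 from rfl] at h
    exact h.symm

theorem pvA_scan_eq (s : List Char) (start : Nat) (fuel : Nat) :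
    ∀ (i : Nat) (d : Int), s.length ≤ i + fuel →
    pvA_scan s start fuel i d
      = (pvB_walk (pvOccs s (pvOpenAt s) i) (pvOccs s (pvCloseAt s) i) d).map
          (fun e => (start, e, List.take (e - start) (List.drop start s))) := by
  induction fuel with
  | zero =>
    intro i d hn
    rw [pvOccs_eq s (pvCloseAt s) i, if_neg (by omega), pvB_walk_nil]
    rfl
  | succ n ih =>
    intro i d hn
    by_cases hi : i < s.length
    case neg =>
      simp only [pvA_scan]
      rw [if_neg hi]
      rw [pvOccs_eq s (pvCloseAt s) i, if_neg hi, pvB_walk_nil]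
      rfl
    case pos =>
    simp only [pvA_scan]
    rw [if_pos hi]
    by_cases hcl : "</div>".toList <+: List.drop i s
    · -- close event at i
      have hnopen : ¬ "<div".toList <+: List.drop i s := pv_open_close_clash hcl
      rw [if_neg (fun hc => hnopen ((pv_open_take_iff s i).mp hc.1))]
      rw [if_pos ((pv_close_take_iff s i).mpr hcl)]
      have hopenF : pvOpenAt s i = false := by
        unfold pvOpenAt
        rw [decide_eq_false hnopen, Bool.false_and]
      have hcloseT : pvCloseAt s i = true := by
        unfold pvCloseAt; exact decide_eq_true hcl
      rw [pvOccs_eq s (pvOpenAt s) i, if_pos hi, hopenF, if_neg Bool.false_ne_true]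
      rw [pvOccs_eq s (pvCloseAt s) i, if_pos hi, hcloseT, if_pos rfl]
      rw [pvB_walk_close i _ _ d
        (fun o ho => by have := pvOccs_ge s (pvOpenAt s) (i + 1) o ho; omega)]
      by_cases hd : d - 1 = 0
      · rw [if_pos hd, if_pos hd]; rfl
      · rw [if_neg hd, if_neg hd]
        exact ih (i + 1) (d - 1) (by omega)
    · by_cases hop : "<div".toList <+: List.drop i s ∧
          (s.length ≤ i + 4 ∨ List.getD s (i + 4) ' ' ∈ [' ', '\t', '>'])
      · -- open event at i
        rw [if_pos ⟨(pv_open_take_iff s i).mpr hop.1, hop.2⟩]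
        have hopenT : pvOpenAt s i = true := by
          unfold pvOpenAt
          rw [decide_eq_true hop.1, Bool.true_and, ← Bool.decide_or]
          exact decide_eq_true hop.2
        have hcloseF : pvCloseAt s i = false := by
          unfold pvCloseAt; exact decide_eq_false hcl
        rw [pvOccs_eq s (pvOpenAt s) i, if_pos hi, hopenT, if_pos rfl]
        rw [pvOccs_eq s (pvCloseAt s) i, if_pos hi, hcloseF, if_neg Bool.false_ne_true]
        rw [pvB_walk_open i _ _ d
          (fun c hc => by have := pvOccs_ge s (pvCloseAt s) (i + 1) c hc; omega)]
        exact ih (i + 1) (d + 1) (by omega)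
      · -- no event at i
        rw [if_neg (fun hc => hop ⟨(pv_open_take_iff s i).mp hc.1, hc.2⟩)]
        rw [if_neg (fun hc => hcl ((pv_close_take_iff s i).mp hc))]
        have hopenF : pvOpenAt s i = false := by
          unfold pvOpenAt
          by_cases hp : "<div".toList <+: List.drop i s
          · rw [decide_eq_true hp, Bool.true_and, ← Bool.decide_or]
            exact decide_eq_false (fun hbc => hop ⟨hp, hbc⟩)
          · rw [decide_eq_false hp, Bool.false_and]
        have hcloseF : pvCloseAt s i = false := by
          unfold pvCloseAt; exact decide_eq_false hcl
        rw [pvOccs_eq s (pvOpenAt s) i, if_pos hi, hopenF, if_neg Bool.false_ne_true]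
        rw [pvOccs_eq s (pvCloseAt s) i, if_pos hi, hcloseF, if_neg Bool.false_ne_true]
        exact ih (i + 1) d (by omega)

theorem pvA_extract_eq (s : List Char) :
    pvA_extract s = (pvB_span s).map
      (fun ab => (ab.1, ab.2, List.take (ab.2 - ab.1) (List.drop ab.1 s))) := by
  rw [pvA_extract.eq_def, pvB_span.eq_def]
  simp only []
  by_cases hst : PySem.Chars.find s "<div class=\"framer-1uotk10\"".toList < 0
  · rw [if_pos hst, if_pos hst]; rfl
  · rw [if_neg hst, if_neg hst]
    have h0 : (0 : Int) ≤ PySem.Chars.find s "<div class=\"framer-1uotk10\"".toList := by omega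
    set st := PySem.Chars.find s "<div class=\"framer-1uotk10\"".toList with hstdef
    have hcast : ((st.toNat : Nat) : Int) = st := Int.toNat_of_nonneg h0
    have hle : st.toNat ≤ s.length := by
      have := PySem.Chars.find_le_length s "<div class=\"framer-1uotk10\"".toList
      omega
    rw [← hcast]
    rw [pvB_openLoop_spec s st.toNat hle, pvB_closeLoop_spec s st.toNat hle]
    simp only [Int.toNat_natCast, List.nil_append]
    rw [pvA_scan_eq s st.toNat s.length st.toNat 0 (by omega)]
    cases hw : pvB_walk (pvOccs s (pvOpenAt s) st.toNat) (pvOccs s (pvCloseAt s) st.toNat) 0 with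
    | none => rfl
    | some e => rfl

theorem pvB_span_bounds (s : List Char) (a b : Nat) (h : pvB_span s = some (a, b)) :
    a + 6 ≤ b ∧ b ≤ s.length := by
  rw [pvB_span.eq_def] at h
  simp only [] at h
  by_cases hst : PySem.Chars.find s "<div class=\"framer-1uotk10\"".toList < 0
  · rw [if_pos hst] at h; cases h
  · rw [if_neg hst] at h
    have h0 : (0 : Int) ≤ PySem.Chars.find s "<div class=\"framer-1uotk10\"".toList := by omega
    set st := PySem.Chars.find s "<div class=\"framer-1uotk10\"".toList with hstdef
    have hcast : ((st.toNat : Nat) : Int) = st := Int.toNat_of_nonneg h0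
    have hle : st.toNat ≤ s.length := by
      have := PySem.Chars.find_le_length s "<div class=\"framer-1uotk10\"".toList
      omega
    rw [← hcast, pvB_openLoop_spec s st.toNat hle, pvB_closeLoop_spec s st.toNat hle] at h
    simp only [Int.toNat_natCast, List.nil_append] at h
    cases hw : pvB_walk (pvOccs s (pvOpenAt s) st.toNat) (pvOccs s (pvCloseAt s) st.toNat) 0 with
    | none => rw [hw] at h; cases h
    | some e =>
      rw [hw] at h
      injection h with h'
      obtain ⟨ha, hb⟩ := Prod.mk.inj h'
      subst ha; subst hb
      obtain ⟨c, hc, he⟩ := pvB_walk_mem _ _ _ _ hw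
      have hgec := pvOccs_ge s (pvCloseAt s) st.toNat c hc
      have hpc := pvOccs_p s (pvCloseAt s) st.toNat c hc
      have hpre : "</div>".toList <+: List.drop c s := by
        simpa [pvCloseAt] using hpc
      have hlen := List.IsPrefix.length_le hpre
      simp only [List.length_drop] at hlen
      have h6 : ("</div>".toList).length = 6 := by decide
      omega

theorem pvA_ctaTail_fix (t : List Char) (h : PySem.Chars.find t "</div>".toList < 0) :
    pvA_ctaTail t = t := by
  unfold pvA_ctaTail
  rw [if_neg (by omega)]

theorem pvB_ctaTail_fix (t : List Char) (h : PySem.Chars.find t "</div>".toList < 0) :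
    ∀ n, pvB_ctaTail n t = t := by
  intro n
  cases n with
  | zero => rfl
  | succ m => simp only [pvB_ctaTail]; rw [if_pos h]

theorem pvB_ctaTail_step (n : Nat) (t : List Char) :
    pvB_ctaTail (n + 1) t = pvB_ctaTail n (pvA_ctaTail t) := by
  simp only [pvB_ctaTail]
  by_cases h : PySem.Chars.find t "</div>".toList < 0
  · rw [if_pos h, pvA_ctaTail_fix t h, pvB_ctaTail_fix t h]
  · rw [if_neg h]
    unfold pvA_ctaTail
    rw [if_pos (by omega)]

theorem pvB_ctaTail_eq4 (t : List Char) :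
    pvB_ctaTail 4 t = pvA_ctaTail (pvA_ctaTail (pvA_ctaTail (pvA_ctaTail t))) := by
  rw [pvB_ctaTail_step, pvB_ctaTail_step, pvB_ctaTail_step, pvB_ctaTail_step]
  rfl

-- ===== VERDICT (by name: the statement is the Claim_ definition above) =====
theorem remove_esl1yf_from_html_spec : Claim_equal_remove_esl1yf_from_html := by
  intro html _hdom
  unfold Spec_remove_esl1yf_from_html
  rw [remove_esl1yf_from_html.eq_def, remove_esl1yf_from_html_alt.eq_def]
  simp only []
  set S := html.toList with hS
  by_cases h1 : PySem.Chars.find S "<footer".toList < 0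
  · rw [if_pos h1, if_pos h1]
  · rw [if_neg h1, if_neg h1]
    set fe := (PySem.Chars.findFrom S "</footer>".toList
      (PySem.Chars.find S "<footer".toList) none + 9).toNat with hfe
    set FT := List.take (fe - (PySem.Chars.find S "<footer".toList).toNat)
      (List.drop (PySem.Chars.find S "<footer".toList).toNat S) with hFT
    set esl := PySem.Chars.find FT "<div class=\"framer-esl1yf\"".toList with hesl
    by_cases h2 : esl < 0
    · rw [if_pos h2, if_pos h2]
    · rw [if_neg h2, if_neg h2]
      set sub := List.drop esl.toNat FT with hsubdef
      rw [pvA_extract_eq]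
      cases hsp : pvB_span sub with
      | none => rfl
      | some ab =>
        obtain ⟨us, ue⟩ := ab
        obtain ⟨hb1, hb2⟩ := pvB_span_bounds sub us ue hsp
        simp only [Option.map_some]
        rw [pvB_ctaTail_eq4]
        have hsub : List.drop (esl.toNat + us) FT = List.drop us sub := by
          rw [hsubdef, List.drop_drop]
        rw [hsub]
        have hlenblock : (List.take (ue - us) (List.drop us sub)).length = ue - us := by
          simp only [List.length_take, List.length_drop]
          omega
        rw [hlenblock, show esl.toNat + us + (ue - us) = esl.toNat + ue from by omega]
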